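-- pv_equiv track=rewrite | github.com/ZiedKnani/ocr-identity | mrz_parser.py | _validate_checksum_digit
-- ===== SOURCE A (Python) =====
-- def _validate_checksum_digit(data: str, check_digit: str) -> bool:
--     """Valide le checksum digit MD10 selon la norme ICAO"""
--     try:
--         weights = [7, 3, 1]
--         total = 0
--         for i, char in enumerate(data):
--             if char.isdigit():
--                 weight = weights[i % 3]
--                 total += int(char) * weight
--             elif char == '<':
--                 weight = weights[i % 3]
--                 total += 0  # '<' compte comme 0
--             else:
--                 # Lettres: A=10, B=11, ..., Z=35
--                 weight = weights[i % 3]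
--                 total += (ord(char) - ord('A') + 10) * weight
--
--         remainder = total % 10
--         return str(remainder) == check_digit.upper()
--     except Exception:
--         return False
-- ===== SOURCE B (Python) =====
-- def _char_value(c: str) -> int:
--     """ICAO value of one MRZ character: digits map to themselves, '<' to 0,
--     anything else via ord(c) - 55 (so A=10 ... Z=35)."""
--     if c.isdigit():
--         return int(c)
--     if c == '<':
--         return 0
--     return ord(c) - 55
--
--
-- def _validate_checksum_digit(data: str, check_digit: str) -> bool:
--     vals = [_char_value(c) for c in data]
--     total = 0
--     j = 0
--     n = len(vals)
--     while j < n: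
--         total += 7 * vals[j]
--         if j + 1 < n:
--             total += 3 * vals[j + 1]
--         if j + 2 < n:
--             total += vals[j + 2]
--         j += 3
--     return str(total % 10) == check_digit.upper()
-- ===== Notes on version B (the rewrite author's own statement) =====
-- stated objective: alternative
-- what changed: Replaces A's enumerate loop that cycles weights via weights[i % 3] with a character-to-value map followed by a while loop over chunks of three values using fixed weights 7,3,1.
import Mathlib
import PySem

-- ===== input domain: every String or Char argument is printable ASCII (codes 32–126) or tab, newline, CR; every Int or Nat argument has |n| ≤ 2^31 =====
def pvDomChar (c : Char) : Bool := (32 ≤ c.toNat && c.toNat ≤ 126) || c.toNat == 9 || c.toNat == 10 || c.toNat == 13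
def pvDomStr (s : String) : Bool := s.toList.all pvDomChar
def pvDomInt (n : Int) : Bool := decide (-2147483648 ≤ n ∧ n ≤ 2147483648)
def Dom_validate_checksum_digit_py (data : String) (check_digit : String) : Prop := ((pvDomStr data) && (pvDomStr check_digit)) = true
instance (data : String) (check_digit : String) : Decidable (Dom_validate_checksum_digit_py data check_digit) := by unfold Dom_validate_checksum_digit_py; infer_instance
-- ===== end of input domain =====

-- B replaces A's enumerate loop with cycled weights (weights[i % 3]) by a char→value map
-- followed by a while-loop over chunks of three values with fixed weights 7,3,1 (alternative decomposition, same cost).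

-- ===== PORT A =====
-- weights[i % 3]; the index is always 0,1,2 so pyGet? never misses (getD 0 is never used)
def pvWeightA (i : Int) : Int := (PySem.List.pyGet? ([7, 3, 1] : List Int) (PySem.Int.mod i 3)).getD 0

-- one iteration of A's for-loop body; int(char) for an ASCII digit char is exactly toNat - 48
def pvStepA (acc : Int) (p : Int × Char) : Int :=
  if PySem.Chars.isdigit p.2 then acc + ((p.2.toNat : Int) - 48) * pvWeightA p.1
  else if p.2 = '<' then acc + 0
  else acc + ((p.2.toNat : Int) - 65 + 10) * pvWeightA p.1

def validate_checksum_digit_py (data : String) (check_digit : String) : Bool :=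
  let total := (PySem.List.enumerate data.toList 0).foldl pvStepA 0
  PySem.Int.toStr (PySem.Int.mod total 10) == PySem.Str.upper check_digit

-- ===== PORT B =====
def pvCharValue (c : Char) : Int :=
  if PySem.Chars.isdigit c then (c.toNat : Int) - 48
  else if c = '<' then 0
  else (c.toNat : Int) - 55

-- B's while loop: j runs 0, 3, 6, … (always ≥ 0, so a Nat); each guarded index is in range,
-- so vals[j] with the guard's proof is exactly Python's vals[j]
def pvLoopB (vals : List Int) (j : Nat) (total : Int) : Int :=
  if h : j < vals.length then
    let t1 := total + 7 * vals[j]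
    let t2 := if h1 : j + 1 < vals.length then t1 + 3 * vals[j + 1] else t1
    let t3 := if h2 : j + 2 < vals.length then t2 + vals[j + 2] else t2
    pvLoopB vals (j + 3) t3
  else total
termination_by vals.length - j

def validate_checksum_digit_py_alt (data : String) (check_digit : String) : Bool :=
  let total := pvLoopB (data.toList.map pvCharValue) 0 0
  PySem.Int.toStr (PySem.Int.mod total 10) == PySem.Str.upper check_digit

-- ===== PRECONDITION & SPEC =====
def Spec_validate_checksum_digit_py (data : String) (check_digit : String) (out : Bool) : Prop := out = validate_checksum_digit_py_alt data check_digit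
instance (data : String) (check_digit : String) (out : Bool) : Decidable (Spec_validate_checksum_digit_py data check_digit out) := by unfold Spec_validate_checksum_digit_py; infer_instance

-- ===== CLAIM (what is proved, stated in full; the proofs are below) =====
def Claim_equal_validate_checksum_digit_py : Prop := ∀ (data : String) (check_digit : String), Dom_validate_checksum_digit_py data check_digit → Spec_validate_checksum_digit_py data check_digit (validate_checksum_digit_py data check_digit)

-- ===== LEMMAS AND PROOFS =====
-- common mathematical form of the weighted total, used only by the proofs
def pvWeightedTotal : List Int → Int
  | [] => 0
  | [a] => 7 * a
  | [a, b] => 7 * a + 3 * b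
  | a :: b :: c :: rest => 7 * a + 3 * b + c + pvWeightedTotal rest

theorem stepA_eq (acc i : Int) (c : Char) :
    pvStepA acc (i, c) = acc + pvCharValue c * pvWeightA i := by
  unfold pvStepA pvCharValue
  split_ifs <;> ring

theorem weightA_mod (i : Int) (j w : Int) (h : PySem.Int.mod i 3 = j)
    (hw : (PySem.List.pyGet? ([7, 3, 1] : List Int) j).getD 0 = w) : pvWeightA i = w := by
  unfold pvWeightA; rw [h, hw]

theorem mod3_eq (i : Int) (h : 0 ≤ i) : PySem.Int.mod i 3 = i % 3 :=
  PySem.Int.mod_eq_emod_of_pos (by norm_num)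

theorem foldA_eq : ∀ (l : List Char) (s acc : Int), 0 ≤ s → s % 3 = 0 →
    (PySem.List.enumerate l s).foldl pvStepA acc = acc + pvWeightedTotal (l.map pvCharValue)
  | [], s, acc, _, _ => by
      simp [PySem.List.enumerate_nil, pvWeightedTotal]
  | [a], s, acc, hs, hm => by
      simp only [PySem.List.enumerate_cons, PySem.List.enumerate_nil, List.foldl, List.map,
        pvWeightedTotal, stepA_eq]
      rw [weightA_mod s 0 7 (by rw [mod3_eq s hs]; omega) (by decide)]
      ring
  | [a, b], s, acc, hs, hm => by
      simp only [PySem.List.enumerate_cons, PySem.List.enumerate_nil, List.foldl, List.map,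
        pvWeightedTotal, stepA_eq]
      rw [weightA_mod s 0 7 (by rw [mod3_eq s hs]; omega) (by decide),
        weightA_mod (s + 1) 1 3 (by rw [mod3_eq (s + 1) (by omega)]; omega) (by decide)]
      ring
  | a :: b :: c :: t, s, acc, hs, hm => by
      simp only [PySem.List.enumerate_cons, List.foldl, List.map, pvWeightedTotal, stepA_eq]
      rw [weightA_mod s 0 7 (by rw [mod3_eq s hs]; omega) (by decide),
        weightA_mod (s + 1) 1 3 (by rw [mod3_eq (s + 1) (by omega)]; omega) (by decide),
        weightA_mod (s + 1 + 1) 2 1 (by rw [mod3_eq (s + 1 + 1) (by omega)]; omega) (by decide),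
        foldA_eq t (s + 1 + 1 + 1) _ (by omega) (by omega)]
      ring

theorem loopB_eq (vals : List Int) (j : Nat) (total : Int) :
    pvLoopB vals j total = total + pvWeightedTotal (vals.drop j) := by
  rw [pvLoopB]
  by_cases h : j < vals.length
  · simp only [h, dif_pos]
    rw [loopB_eq vals (j + 3)]
    have hd : vals.drop j = vals[j] :: vals.drop (j + 1) := List.drop_eq_getElem_cons h
    by_cases h1 : j + 1 < vals.length
    · have hd1 : vals.drop (j + 1) = vals[j + 1] :: vals.drop (j + 2) :=
        List.drop_eq_getElem_cons h1
      by_cases h2 : j + 2 < vals.length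
      · have hd2 : vals.drop (j + 2) = vals[j + 2] :: vals.drop (j + 3) :=
          List.drop_eq_getElem_cons h2
        simp only [dif_pos h1, dif_pos h2, hd, hd1, hd2, pvWeightedTotal]
        ring
      · have hd3 : vals.drop (j + 2) = [] := List.drop_eq_nil_of_le (by omega)
        have hd4 : vals.drop (j + 3) = [] := List.drop_eq_nil_of_le (by omega)
        simp only [dif_pos h1, dif_neg h2, hd, hd1, hd3, hd4, pvWeightedTotal]
        ring
    · have h2 : ¬ j + 2 < vals.length := by omega
      have hd1 : vals.drop (j + 1) = [] := List.drop_eq_nil_of_le (by omega)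
      have hd4 : vals.drop (j + 3) = [] := List.drop_eq_nil_of_le (by omega)
      simp only [dif_neg h1, dif_neg h2, hd, hd1, hd4, pvWeightedTotal]
      ring
  · have hd : vals.drop j = [] := List.drop_eq_nil_of_le (by omega)
    simp [h, hd, pvWeightedTotal]
termination_by vals.length - j

-- ===== VERDICT (by name: the statement is the Claim_ definition above) =====
theorem validate_checksum_digit_py_spec : Claim_equal_validate_checksum_digit_py := by
  intro data check_digit _
  unfold Spec_validate_checksum_digit_py validate_checksum_digit_py validate_checksum_digit_py_alt
  rw [foldA_eq data.toList 0 0 (by norm_num) (by norm_num), loopB_eq]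
  norm_num
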